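-- pv_equiv track=rewrite | github.com/jorio/gitfourchette | gitfourchette/gitdriver/parsers.py | iterateLines
-- ===== SOURCE A (Python) =====
-- def iterateLines(text: str):
--     pos = 0
--     limit = len(text)
--
--     while pos < limit:
--         nextPos = text.find('\n', pos)
--         if nextPos < 0:
--             nextPos = limit
--         else:
--             nextPos += 1
--         yield pos, nextPos
--         pos = nextPos
-- ===== SOURCE B (Python) =====
-- def iterateLines(text: str):
--     ends = [i + 1 for i, c in enumerate(text) if c == '\n']
--     n = len(text)
--     if text and (not ends or ends[-1] != n):
--         ends.append(n)
--     start = 0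
--     for e in ends:
--         yield start, e
--         start = e
-- ===== Notes on version B (the rewrite author's own statement) =====
-- stated objective: alternative
-- what changed: A interleaves str.find with yielding inside one while-loop; B first collects all line-end offsets in a single enumerate pass (appending len(text) when the last line has no trailing newline), then pairs them with a running start cursor in a separate loop.
import Mathlib
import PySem

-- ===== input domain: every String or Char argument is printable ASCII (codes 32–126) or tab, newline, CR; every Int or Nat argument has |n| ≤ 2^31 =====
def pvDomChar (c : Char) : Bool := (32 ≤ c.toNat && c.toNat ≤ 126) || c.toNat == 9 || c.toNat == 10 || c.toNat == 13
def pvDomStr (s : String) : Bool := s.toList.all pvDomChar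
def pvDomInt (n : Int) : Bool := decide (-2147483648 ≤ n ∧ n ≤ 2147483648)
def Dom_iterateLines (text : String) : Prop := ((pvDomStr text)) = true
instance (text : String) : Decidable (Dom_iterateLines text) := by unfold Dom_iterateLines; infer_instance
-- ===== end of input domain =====

-- B re-implements the interleaved find-and-yield loop as: collect all line-end offsets in
-- one enumerate pass, then pair them with a running start cursor (objective: alternative
-- decomposition, same linear cost). Return-value equivalence only (both are generators in Python).

-- ===== PORT A =====
-- the while-loop of A; one fuel unit per iteration (fuel = len+1 always suffices)
def iterLoopA (cs : List Char) (limit : Int) (pos : Int) (fuel : Nat) : List (Int × Int) :=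
  match fuel with
  | 0 => []
  | fuel + 1 =>
    if pos < limit then
      let f := PySem.Chars.findFrom cs ['\n'] pos none
      let nextPos := if f < 0 then limit else f + 1
      (pos, nextPos) :: iterLoopA cs limit nextPos fuel
    else []

def iterateLines (text : String) : List (Int × Int) :=
  iterLoopA text.toList (PySem.Str.len text) 0 (text.toList.length + 1)

-- ===== PORT B =====
def iterateLines_alt (text : String) : List (Int × Int) :=
  let cs := text.toList
  let ends := (PySem.List.enumerate cs 0).foldl
      (fun acc (p : Int × Char) => if p.2 = '\n' then acc ++ [p.1 + 1] else acc) ([] : List Int)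
  let n : Int := PySem.Str.len text
  -- 'if text and (not ends or ends[-1] != n)'
  let ends2 := if cs.length != 0 && ends.getLast? != some n then ends ++ [n] else ends
  (ends2.foldl (fun (p : Int × List (Int × Int)) e => (e, p.2 ++ [(p.1, e)])) (0, [])).2

-- ===== PRECONDITION & SPEC =====
def Spec_iterateLines (text : String) (out : List (Int × Int)) : Prop := out = iterateLines_alt text
instance (text : String) (out : List (Int × Int)) : Decidable (Spec_iterateLines text out) := by unfold Spec_iterateLines; infer_instance

-- ===== CLAIM (what is proved, stated in full; the proofs are below) =====
def Claim_equal_iterateLines : Prop := ∀ (text : String), Dom_iterateLines text → Spec_iterateLines text (iterateLines text)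

-- ===== LEMMAS AND PROOFS =====

-- absolute offsets (shifted by k) one past each '\n' of s
def nlEnds (s : List Char) (k : Int) : List Int :=
  match s with
  | [] => []
  | c :: t => if c = '\n' then (k + 1) :: nlEnds t (k + 1) else nlEnds t (k + 1)

-- the full list of line ends of s starting at offset k (B's `ends` after the append)
def lineEnds (s : List Char) (k : Int) : List Int :=
  let ns := nlEnds s k
  if s.length ≠ 0 ∧ ns.getLast? ≠ some (k + s.length) then ns ++ [k + s.length] else ns

-- pair consecutive ends with a running start cursor
def pairUp : Int → List Int → List (Int × Int)
  | _, [] => []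
  | st, e :: es => (st, e) :: pairUp e es

theorem singleton_prefix_iff_head? (a : Char) (l : List Char) : [a] <+: l ↔ l.head? = some a := by
  cases l with
  | nil => simp
  | cons b t =>
    constructor
    · rintro ⟨u, hu⟩; simp at hu; simp [hu.1]
    · intro h; simp at h; exact ⟨t, by simp [h]⟩

theorem nlEnds_eq_nil_of_not_mem (s : List Char) (k : Int) (h : '\n' ∉ s) : nlEnds s k = [] := by
  induction s generalizing k with
  | nil => rfl
  | cons c t ih =>
    simp at h
    have hc : c ≠ '\n' := fun hh => h.1 hh.symm
    simp [nlEnds, hc, ih _ h.2]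

theorem nlEnds_split (s : List Char) (k : Int) (m : Nat) (hm : m < s.length)
    (hc : s[m]? = some '\n') (hmin : ∀ i, i < m → s[i]? ≠ some '\n') :
    nlEnds s k = (k + m + 1) :: nlEnds (s.drop (m + 1)) (k + m + 1) := by
  induction s generalizing k m with
  | nil => simp at hm
  | cons c t ih =>
    cases m with
    | zero => simp_all [nlEnds]
    | succ m' =>
      have hc0 : c ≠ '\n' := by
        intro h; exact hmin 0 (by omega) (by simp [h])
      have := ih (k + 1) m' (by simpa using hm) (by simpa using hc)
        (fun i hi => by have := hmin (i + 1) (by omega); simpa using this)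
      simp [nlEnds, hc0, this]
      constructor
      · ring
      · ring_nf

theorem lineEnds_nil (k : Int) : lineEnds [] k = [] := by simp [lineEnds, nlEnds]

theorem lineEnds_no_nl (s : List Char) (k : Int) (hne : s ≠ []) (h : '\n' ∉ s) :
    lineEnds s k = [k + s.length] := by
  have h0 : nlEnds s k = [] := nlEnds_eq_nil_of_not_mem s k h
  simp [lineEnds, h0, hne]

theorem lineEnds_split (s : List Char) (k : Int) (m : Nat) (hm : m < s.length)
    (hc : s[m]? = some '\n') (hmin : ∀ i, i < m → s[i]? ≠ some '\n') :
    lineEnds s k = (k + m + 1) :: lineEnds (s.drop (m + 1)) (k + m + 1) := by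
  have hn := nlEnds_split s k m hm hc hmin
  have hsne : s ≠ [] := by intro h; subst h; simp at hm
  have hdl : (s.drop (m + 1)).length = s.length - (m + 1) := List.length_drop
  by_cases hb : s.drop (m + 1) = []
  · -- '\n' is the last char of s: no append on either side
    have hb0 : (s.drop (m + 1)).length = 0 := by rw [hb]; rfl
    have hcast : k + (s.length : Int) = k + ↑m + 1 := by omega
    simp only [lineEnds, hn, hb, nlEnds, hcast]
    simp
  · have hblen : 0 < (s.drop (m + 1)).length := List.length_pos_of_ne_nil hb
    have hcast : k + (s.length : Int) = (k + ↑m + 1) + ((s.length - (m + 1) : Nat) : Int) := by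
      omega
    simp only [lineEnds, hn, List.length_drop, hcast]
    rcases hns : nlEnds (s.drop (m + 1)) (k + ↑m + 1) with _ | ⟨e, es⟩
    · have hne2 : ¬ (some (k + ↑m + 1) = some ((k + ↑m + 1) + ((s.length - (m + 1) : Nat) : Int))) := by
        simp; omega
      simp [hsne, hns, hne2]
      omega
    · by_cases hl : (e :: es).getLast? = some ((k + ↑m + 1) + ((s.length - (m + 1) : Nat) : Int))
      · simp [hsne, hns, hl]
      · simp [hsne, hns, hl]
        omega

-- find cs ['\n'] characterization helpers
theorem prefix_nl_iff (s : List Char) (i : Nat) : ['\n'] <+: s.drop i ↔ s[i]? = some '\n' := by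
  rw [singleton_prefix_iff_head?]
  simp [List.head?_drop]

-- the B-side folds
theorem enum_fold_eq_nlEnds (s : List Char) (k : Int) (acc : List Int) :
    (PySem.List.enumerate s k).foldl
      (fun acc (p : Int × Char) => if p.2 = '\n' then acc ++ [p.1 + 1] else acc) acc
    = acc ++ nlEnds s k := by
  induction s generalizing k acc with
  | nil => simp [PySem.List.enumerate_nil, nlEnds]
  | cons c t ih =>
    rw [PySem.List.enumerate_cons, List.foldl_cons]
    by_cases hc : c = '\n'
    · simpa [nlEnds, hc] using ih (k + 1) (acc ++ [k + 1])
    · simpa [nlEnds, hc] using ih (k + 1) acc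

theorem pair_fold_eq_pairUp (es : List Int) (st : Int) (acc : List (Int × Int)) :
    (es.foldl (fun (p : Int × List (Int × Int)) e => (e, p.2 ++ [(p.1, e)])) (st, acc)).2
    = acc ++ pairUp st es := by
  induction es generalizing st acc with
  | nil => simp [pairUp]
  | cons e es ih => simp [List.foldl_cons, ih, pairUp]

theorem alt_eq_pairUp (text : String) :
    iterateLines_alt text = pairUp 0 (lineEnds text.toList 0) := by
  unfold iterateLines_alt
  simp only [enum_fold_eq_nlEnds, List.nil_append, pair_fold_eq_pairUp, PySem.Str.len_eq]
  congr 1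
  unfold lineEnds
  simp only [zero_add]
  by_cases h1 : text.toList.length = 0
  · simp [h1]
  · by_cases h2 : (nlEnds text.toList 0).getLast? = some ((text.toList.length : Int))
    · simp [h2]
    · simp

-- the A-side loop
theorem loopA_eq (fuel : Nat) (cs : List Char) (pos : Int)
    (h0 : 0 ≤ pos) (h1 : pos ≤ cs.length) (hf : cs.length - pos.toNat < fuel) :
    iterLoopA cs cs.length pos fuel = pairUp pos (lineEnds (cs.drop pos.toNat) pos) := by
  induction fuel generalizing pos with
  | zero => omega
  | succ fuel ih =>
    by_cases hlt : pos < cs.length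
    · have hkn : pos.toNat ≤ cs.length := by omega
      have hdlen : (cs.drop pos.toNat).length = cs.length - pos.toNat := List.length_drop
      have hdropne : cs.drop pos.toNat ≠ [] := by
        intro h; rw [h] at hdlen; simp at hdlen; omega
      have hff := PySem.Chars.findFrom_natCast cs ['\n'] pos.toNat hkn
      have hpos : (pos.toNat : Int) = pos := by omega
      rw [hpos] at hff
      set j := PySem.Chars.find (cs.drop pos.toNat) ['\n'] with hj
      by_cases hjneg : j = -1
      · -- no newline at or after pos: one final line up to limit
        have hnomem : '\n' ∉ cs.drop pos.toNat := by
          have := (PySem.Chars.find_eq_neg_one_iff (cs.drop pos.toNat) ['\n']).mp (by rw [← hj]; exact hjneg)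
          intro hmem; exact this ((List.singleton_infix_iff _ _).mpr hmem)
        rw [lineEnds_no_nl _ _ hdropne hnomem]
        have hlen2 : pos + ((cs.drop pos.toNat).length : Int) = cs.length := by
          rw [hdlen]; omega
        have hffv : PySem.Chars.findFrom cs ['\n'] pos = -1 := by rw [hff, if_pos hjneg]
        have htail : iterLoopA cs cs.length (cs.length) fuel = [] := by
          cases fuel with
          | zero => rfl
          | succ f => unfold iterLoopA; rw [if_neg (by omega)]
        unfold iterLoopA
        rw [if_pos hlt]
        simp only [hffv]
        rw [if_pos (show (-1 : Int) < 0 by omega), htail, hlen2]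
        simp [pairUp]
      · -- newline found at relative index j
        have hj0 : 0 ≤ j := by
          have := PySem.Chars.neg_one_le_find (cs.drop pos.toNat) ['\n']
          rw [← hj] at this; omega
        have hspec := PySem.Chars.find_spec (s := cs.drop pos.toNat) (sub := ['\n']) (by rw [← hj]; omega)
        rw [← hj] at hspec
        obtain ⟨hpre, hmin⟩ := hspec
        have hjlt : j.toNat < (cs.drop pos.toNat).length := by
          rcases hpre with ⟨u, hu⟩
          have hlenu : ((cs.drop pos.toNat).drop j.toNat).length = u.length + 1 := by
            rw [← hu]; simp
          rw [List.length_drop] at hlenu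
          omega
        have hc : (cs.drop pos.toNat)[j.toNat]? = some '\n' :=
          (prefix_nl_iff _ _).mp (by simpa using hpre)
        have hminc : ∀ i, i < j.toNat → (cs.drop pos.toNat)[i]? ≠ some '\n' := by
          intro i hi hci
          exact hmin i hi ((prefix_nl_iff _ _).mpr hci)
        have hdropdrop : (cs.drop pos.toNat).drop (j.toNat + 1) = cs.drop (pos + j + 1).toNat := by
          rw [List.drop_drop]
          congr 1
          omega
        have hjint : (j.toNat : Int) = j := by omega
        have hnext1 : pos + j + 1 ≤ (cs.length : Int) := by
          rw [List.length_drop] at hjlt; omega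
        have hffv : PySem.Chars.findFrom cs ['\n'] pos = pos + j := by rw [hff, if_neg hjneg]
        rw [lineEnds_split _ _ j.toNat hjlt hc hminc, hjint, hdropdrop]
        unfold iterLoopA
        rw [if_pos hlt]
        simp only [hffv]
        rw [if_neg (show ¬(pos + j < 0) by omega)]
        rw [ih (pos + j + 1) (by omega) hnext1 (by rw [List.length_drop] at hjlt; omega)]
        simp [pairUp]
    · -- pos ≥ limit: the loop stops and there are no ends left
      have hpn : pos.toNat = cs.length := by omega
      unfold iterLoopA
      rw [if_neg hlt, hpn]
      simp [lineEnds_nil, pairUp]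

-- ===== VERDICT (by name: the statement is the Claim_ definition above) =====
theorem iterateLines_spec : Claim_equal_iterateLines := by
  intro text _
  unfold Spec_iterateLines
  rw [alt_eq_pairUp]
  unfold iterateLines
  rw [PySem.Str.len_eq]
  rw [loopA_eq (text.toList.length + 1) text.toList 0 (by omega) (by simp) (by omega)]
  simp
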